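-- pv_equiv track=rewrite | github.com/solaris-9/Boeng | allocate/mysqlviews.py | prjnum
-- ===== SOURCE A (Python) =====
-- def prjnum(string):
--     prjnumlist = string.split(',')
--     prjno =  string.strip()[:4]
--     for r in prjnumlist:
--         if 'BBDPIPL' in r:
--             prjno = r.strip()
--             break
--         elif len(r.strip()) == 4 or (len(r.strip()) == 5 and r[:1]=='W'):
--             prjno = r.strip()
--     return prjno
-- ===== SOURCE B (Python) =====
-- def prjnum(string):
--     tokens = string.split(',')
--     # pass 1: a BBDPIPL token wins immediately
--     for r in tokens:
--         if 'BBDPIPL' in r: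
--             return r.strip()
--     # pass 2: last token shaped like a project number wins; default is the head of the string
--     prjno = string.strip()[:4]
--     for r in tokens:
--         rs = r.strip()
--         if len(rs) == 4 or (len(rs) == 5 and r[:1] == 'W'):
--             prjno = rs
--     return prjno
-- ===== Notes on version B (the rewrite author's own statement) =====
-- stated objective: simpler
-- what changed: A's single accumulator loop with break is split into two plain scans: an early-return search for a 'BBDPIPL' token, then a last-match-wins scan over the shape condition; no break/accumulator interleaving.
import Mathlib
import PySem

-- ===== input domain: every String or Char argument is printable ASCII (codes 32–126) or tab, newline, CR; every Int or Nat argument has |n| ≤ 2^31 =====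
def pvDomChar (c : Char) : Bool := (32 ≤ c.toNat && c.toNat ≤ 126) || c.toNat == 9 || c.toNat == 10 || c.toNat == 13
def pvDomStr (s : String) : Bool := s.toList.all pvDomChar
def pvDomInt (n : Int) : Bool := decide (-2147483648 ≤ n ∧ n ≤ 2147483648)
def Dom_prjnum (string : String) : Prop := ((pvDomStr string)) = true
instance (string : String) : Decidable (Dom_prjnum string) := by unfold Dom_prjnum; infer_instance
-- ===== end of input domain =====

-- B replaces A's break-loop with accumulator by two plain scans (search, then last-match-wins); same value, simpler shape.

-- ===== PORT A =====
-- the loop: accumulator prjno, break on 'BBDPIPL'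
def prjnumGo : List String → String → String
  | [], prjno => prjno
  | r :: rs, prjno =>
      if PySem.Str.isIn "BBDPIPL" r then PySem.Str.strip r
      else if PySem.Str.len (PySem.Str.strip r) == 4 ||
              (PySem.Str.len (PySem.Str.strip r) == 5 && PySem.Str.slice r none (some 1) == "W") then
        prjnumGo rs (PySem.Str.strip r)
      else prjnumGo rs prjno

def prjnum (string : String) : String :=
  let prjnumlist := (PySem.Str.split? string ",").getD []   -- sep "," is non-empty: split? is some; getD is a totality guard only
  let prjno := PySem.Str.slice (PySem.Str.strip string) none (some 4)
  prjnumGo prjnumlist prjno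

-- ===== PORT B =====
-- pass 1: first token containing 'BBDPIPL', if any
def prjnumAltFind : List String → Option String
  | [] => none
  | r :: rs => if PySem.Str.isIn "BBDPIPL" r then some (PySem.Str.strip r) else prjnumAltFind rs

-- pass 2: last token of project-number shape overwrites prjno
def prjnumAltScan : List String → String → String
  | [], prjno => prjno
  | r :: rs, prjno =>
      let rstr := PySem.Str.strip r
      if PySem.Str.len rstr == 4 ||
         (PySem.Str.len rstr == 5 && PySem.Str.slice r none (some 1) == "W") then
        prjnumAltScan rs rstr
      else prjnumAltScan rs prjno

def prjnum_alt (string : String) : String :=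
  let tokens := (PySem.Str.split? string ",").getD []   -- sep "," is non-empty: split? is some; getD is a totality guard only
  match prjnumAltFind tokens with
  | some v => v
  | none => prjnumAltScan tokens (PySem.Str.slice (PySem.Str.strip string) none (some 4))

-- ===== PRECONDITION & SPEC =====
def Spec_prjnum (string : String) (out : String) : Prop := out = prjnum_alt string
instance (string : String) (out : String) : Decidable (Spec_prjnum string out) := by unfold Spec_prjnum; infer_instance

-- ===== CLAIM (what is proved, stated in full; the proofs are below) =====
def Claim_equal_prjnum : Prop := ∀ (string : String), Dom_prjnum string → Spec_prjnum string (prjnum string)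

-- ===== LEMMAS AND PROOFS =====
theorem prjnumGo_eq (ts : List String) (init : String) :
    prjnumGo ts init =
      match prjnumAltFind ts with
      | some v => v
      | none => prjnumAltScan ts init := by
  induction ts generalizing init with
  | nil => rfl
  | cons r rs ih =>
    simp only [prjnumGo, prjnumAltFind, prjnumAltScan]
    by_cases h : PySem.Str.isIn "BBDPIPL" r = true
    · rw [if_pos h, if_pos h]
    · rw [if_neg h, if_neg h]
      split_ifs with hc
      · simpa using ih (PySem.Str.strip r)
      · simpa using ih init

-- ===== VERDICT (by name: the statement is the Claim_ definition above) =====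
theorem prjnum_spec : Claim_equal_prjnum := by
  intro s _
  unfold Spec_prjnum prjnum prjnum_alt
  exact prjnumGo_eq _ _
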